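-- pv_equiv track=rewrite | github.com/ZR-Huang/AlgorithmsPractices | Leetcode/Coding Interviews/61_Is_Straight.py | isStraight_v2
-- ===== SOURCE A (Python) =====
-- from typing import List
--
-- def isStraight_v2(nums: List[int]) -> bool:
--     nums = sorted(nums)
--     zeroCount, i = 0, 0
--     while i<5 and nums[i]==0:
--         zeroCount+=1
--         i+=1
--     if i>=5:
--         return True
--
--     while i<4:
--         if nums[i+1]-nums[i]==1:
--             i+=1
--         elif (nums[i+1]-nums[i]>1 and nums[i+1]-nums[i]-1 <= zeroCount):
--             zeroCount -= nums[i+1]-nums[i]-1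
--             i+=1
--         elif (nums[i+1]-nums[i]>1 and nums[i+1]-nums[i]-1 > zeroCount) or (nums[i+1]-nums[i]<1):
--             return False
--     return True
-- ===== SOURCE B (Python) =====
-- def isStraight_v2(nums):
--     five = sorted(nums)[:5]
--     k = 0
--     while k < 5 and five[k] == 0:
--         k += 1
--     cards = five[k:]
--     return (not cards) or (len(set(cards)) == len(cards)
--                            and cards[-1] - cards[0] <= len(five) - 1)
-- ===== Notes on version B (the rewrite author's own statement) =====
-- stated objective: simpler
-- what changed: Replaces A's greedy joker-consuming gap walk over adjacent sorted pairs with a direct check: drop the leading zeros of the sorted hand, then 'no duplicates (set size) and last - first <= 4'.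
import Mathlib
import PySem

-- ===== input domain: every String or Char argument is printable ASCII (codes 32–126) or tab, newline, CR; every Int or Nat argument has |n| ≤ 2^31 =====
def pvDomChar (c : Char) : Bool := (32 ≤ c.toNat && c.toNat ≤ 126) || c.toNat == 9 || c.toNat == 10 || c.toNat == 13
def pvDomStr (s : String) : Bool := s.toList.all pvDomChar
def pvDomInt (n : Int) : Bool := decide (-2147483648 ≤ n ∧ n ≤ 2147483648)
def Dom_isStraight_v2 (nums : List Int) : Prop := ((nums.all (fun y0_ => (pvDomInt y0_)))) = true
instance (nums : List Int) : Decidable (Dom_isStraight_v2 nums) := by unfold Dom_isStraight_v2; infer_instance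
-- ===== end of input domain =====

-- B replaces A's greedy joker-consuming gap walk with a direct check: drop the leading
-- zeros of the sorted hand, then 'no duplicates and last - first ≤ hand size - 1' (simpler).

-- ===== PORT A =====
-- while i<5 and nums[i]==0: the index walk becomes structural recursion on the list tail at
-- position i (exact where i stays in range, i.e. under Pre_; Python raises past the end).
def pvA_loop1 : List Int → Nat → Nat → Nat × Nat
  | x :: xs, zc, i => if i < 5 ∧ x = 0 then pvA_loop1 xs (zc + 1) (i + 1) else (zc, i)
  | [], zc, i => (zc, i)

-- while i<4: reads nums[i], nums[i+1]; recursion on the tail starting at i (exact under Pre_).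
-- The final 'else false' is Python's exhaustive third elif: (d>1 ∧ d-1>zc) ∨ d<1.
def pvA_loop2 : Int → Nat → List Int → Bool
  | zc, i, x :: y :: xs =>
    if 4 ≤ i then true
    else
      if y - x = 1 then pvA_loop2 zc (i + 1) (y :: xs)
      else if 1 < y - x ∧ y - x - 1 ≤ zc then pvA_loop2 (zc - (y - x - 1)) (i + 1) (y :: xs)
      else false
  | _, _, _ => true

def pvA_body (s : List Int) : Bool :=
  let p := pvA_loop1 s 0 0
  if 5 ≤ p.2 then true
  else pvA_loop2 (p.1 : Int) p.2 (s.drop p.2)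

def isStraight_v2 (nums : List Int) : Bool :=
  pvA_body (PySem.List.sorted nums (fun x => x) false)

-- ===== PORT B =====
-- while k<5 and five[k]==0 (leading-zero count), as structural recursion at position k.
def pvB_lead : List Int → Nat → Nat
  | x :: xs, k => if k < 5 ∧ x = 0 then pvB_lead xs (k + 1) else k
  | [], k => k

def pvB_body (s : List Int) : Bool :=
  let five := PySem.List.slice s none (some 5)
  let k := pvB_lead five 0
  let cards := PySem.List.slice five (some (k : Int)) none
  decide (cards = []) ||
    (decide ((PySem.Set.ofList cards).length = cards.length) &&
      decide ((PySem.List.pyGet? cards (-1)).getD 0 - (PySem.List.pyGet? cards 0).getD 0 ≤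
        (five.length : Int) - 1))

def isStraight_v2_alt (nums : List Int) : Bool :=
  pvB_body (PySem.List.sorted nums (fun x => x) false)

-- ===== PRECONDITION & SPEC =====
-- Pre_ excludes exactly the inputs on which A raises IndexError: hands of fewer than 5
-- cards whose scan runs off the end (all jokers, or a duplicate-free hand whose span fits
-- the hand size, so the gap walk never fails early).
def Pre_isStraight_v2 (nums : List Int) : Prop :=
  5 ≤ nums.length ∨
    (nums ≠ [] ∧
      ¬ ((if nums.all (fun v => decide (0 ≤ v)) then nums.filter (fun v => decide (v ≠ 0))
          else nums) = [] ∨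
        ((if nums.all (fun v => decide (0 ≤ v)) then nums.filter (fun v => decide (v ≠ 0))
          else nums).Nodup ∧
         ∀ x ∈ (if nums.all (fun v => decide (0 ≤ v)) then nums.filter (fun v => decide (v ≠ 0))
            else nums),
          ∀ y ∈ (if nums.all (fun v => decide (0 ≤ v)) then nums.filter (fun v => decide (v ≠ 0))
            else nums), x - y ≤ (nums.length : Int) - 1)))
instance (nums : List Int) : Decidable (Pre_isStraight_v2 nums) := by
  unfold Pre_isStraight_v2; infer_instance

def pvWitness_isStraight_v2 : List Int := [0, 3, 2, 6, 5]

def Spec_isStraight_v2 (nums : List Int) (out : Bool) : Prop := out = isStraight_v2_alt nums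
instance (nums : List Int) (out : Bool) : Decidable (Spec_isStraight_v2 nums out) := by
  unfold Spec_isStraight_v2; infer_instance

-- ===== CLAIM (what is proved, stated in full; the proofs are below) =====
def Claim_equal_isStraight_v2 : Prop :=
  ∀ (nums : List Int), Dom_isStraight_v2 nums → Pre_isStraight_v2 nums →
    Spec_isStraight_v2 nums (isStraight_v2 nums)

-- ===== LEMMAS AND PROOFS =====

lemma pvA_loop1_stop (l : List Int) (zc : Nat) : pvA_loop1 l zc 5 = (zc, 5) := by
  cases l <;> simp [pvA_loop1]

lemma pvA_loop2_at4 (zc : Int) (l : List Int) : pvA_loop2 zc 4 l = true := by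
  match l with
  | [] => rfl
  | [_] => rfl
  | _ :: _ :: _ => simp [pvA_loop2]

-- strict adjacent increase along a chain, used to characterise A's gap walk
def chainLt : Int → List Int → Bool
  | _, [] => true
  | x, y :: ys => (decide (x + 1 ≤ y)) && chainLt y ys

lemma chainLt_last_ge : ∀ (t : List Int) (y : Int), chainLt y t = true →
    y + t.length ≤ t.getLastD y := by
  intro t
  induction t with
  | nil => intro y _; simp
  | cons z t' ih =>
    intro y h
    simp only [chainLt, Bool.and_eq_true, decide_eq_true_eq] at h
    have := ih z h.2
    simp only [List.getLastD_cons, List.length_cons]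
    push_cast
    omega

-- A's second loop on a sorted tail is 'all adjacent gaps ≥ 1 and span ≤ jokers + steps'
lemma loop2_char : ∀ (n : Nat) (x zc : Int) (l : List Int), n ≤ 4 → n ≤ l.length → 0 ≤ zc →
    (x :: l).Pairwise (fun p q => p ≤ q) →
    (pvA_loop2 zc (4 - n) (x :: l) = true ↔
      (chainLt x (l.take n) = true ∧ (l.take n).getLastD x - x ≤ zc + n)) := by
  intro n
  induction n with
  | zero =>
    intro x zc l _ _ h0 _
    rw [pvA_loop2_at4]
    simp [chainLt]
    omega
  | succ n ih =>
    intro x zc l hn4 hlen h0 hpw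
    match l, hlen with
    | y :: l', hlen =>
      have hxy : x ≤ y := (List.pairwise_cons.mp hpw).1 y (by simp)
      have hpw' : (y :: l').Pairwise (fun p q => p ≤ q) := (List.pairwise_cons.mp hpw).2
      have hi : 4 - (n + 1) + 1 = 4 - n := by omega
      have hlen' : n ≤ l'.length := by simp at hlen; omega
      rw [show pvA_loop2 zc (4 - (n + 1)) (x :: y :: l') =
          (if y - x = 1 then pvA_loop2 zc (4 - (n + 1) + 1) (y :: l')
           else if 1 < y - x ∧ y - x - 1 ≤ zc then
             pvA_loop2 (zc - (y - x - 1)) (4 - (n + 1) + 1) (y :: l')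
           else false) from by simp [pvA_loop2, show ¬ (4 ≤ 3 - n) from by omega]]
      rw [hi]
      simp only [List.take_succ_cons, List.getLastD_cons]
      split_ifs with hd1 hd2
      · rw [ih y zc l' (by omega) hlen' h0 hpw']
        simp only [chainLt, Bool.and_eq_true, decide_eq_true_eq]
        constructor
        · rintro ⟨hc, hb⟩; exact ⟨⟨by omega, hc⟩, by omega⟩
        · rintro ⟨⟨_, hc⟩, hb⟩; exact ⟨hc, by omega⟩
      · rw [ih y (zc - (y - x - 1)) l' (by omega) hlen' (by omega) hpw']
        simp only [chainLt, Bool.and_eq_true, decide_eq_true_eq]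
        constructor
        · rintro ⟨hc, hb⟩; exact ⟨⟨by omega, hc⟩, by omega⟩
        · rintro ⟨⟨_, hc⟩, hb⟩; exact ⟨hc, by omega⟩
      · simp only [false_iff, not_and, chainLt, Bool.and_eq_true, decide_eq_true_eq]
        rintro ⟨hy, hc⟩ hb
        have hlast := chainLt_last_ge (l'.take n) y hc
        have hlt : (l'.take n).length = n := by simp [List.length_take]; omega
        rw [hlt] at hlast
        omega

set_option maxHeartbeats 4000000 in
lemma pv_core (a b c d e : Int) (rest : List Int)
    (hpw : (a :: b :: c :: d :: e :: rest).Pairwise (fun p q => p ≤ q)) :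
    pvA_body (a :: b :: c :: d :: e :: rest) = pvB_body (a :: b :: c :: d :: e :: rest) := by
  have hfive : PySem.List.slice (a :: b :: c :: d :: e :: rest) none (some 5) = [a, b, c, d, e] := by
    rw [PySem.List.slice_to _ (by norm_num)]; rfl
  have hpw1 : (b :: c :: d :: e :: rest).Pairwise (fun p q => p ≤ q) :=
    (List.pairwise_cons.mp hpw).2
  have hpw2 : (c :: d :: e :: rest).Pairwise (fun p q => p ≤ q) :=
    (List.pairwise_cons.mp hpw1).2
  have hpw3 : (d :: e :: rest).Pairwise (fun p q => p ≤ q) :=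
    (List.pairwise_cons.mp hpw2).2
  have hpw4 : (e :: rest).Pairwise (fun p q => p ≤ q) :=
    (List.pairwise_cons.mp hpw3).2
  have hab : a ≤ b := (List.pairwise_cons.mp hpw).1 b (by simp)
  have hbc : b ≤ c := (List.pairwise_cons.mp hpw1).1 c (by simp)
  have hcd : c ≤ d := (List.pairwise_cons.mp hpw2).1 d (by simp)
  have hde : d ≤ e := (List.pairwise_cons.mp hpw3).1 e (by simp)
  rw [Bool.eq_iff_iff]
  simp only [pvA_body, pvB_body, hfive]
  by_cases ha : a = 0
  case neg =>
    have hA := loop2_char 4 a 0 (b :: c :: d :: e :: rest) (by omega) (by simp) (by omega) hpw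
    have hl1 : pvA_loop1 (a :: b :: c :: d :: e :: rest) 0 0 = (0, 0) := by
      simp [pvA_loop1, ha]
    have hl2 : pvB_lead [a, b, c, d, e] 0 = 0 := by simp [pvB_lead, ha]
    rw [hl1, hl2]
    norm_num
    rw [hA]
    simp [chainLt, PySem.Set.ofList, PySem.Set.add, List.take, PySem.List.pyGet?_neg_one]
    split_ifs <;> simp_all <;> omega
  case pos =>
  subst ha
  by_cases hb : b = 0
  case neg =>
    have hA := loop2_char 3 b 1 (c :: d :: e :: rest) (by omega) (by simp) (by omega) hpw1
    have hl1 : pvA_loop1 (0 :: b :: c :: d :: e :: rest) 0 0 = (1, 1) := by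
      simp [pvA_loop1, hb]
    have hl2 : pvB_lead [0, b, c, d, e] 0 = 1 := by simp [pvB_lead, hb]
    rw [hl1, hl2]
    norm_num
    rw [hA]
    simp [chainLt, PySem.Set.ofList, PySem.Set.add, List.take, PySem.List.pyGet?_neg_one,
      PySem.List.slice_from]
    split_ifs <;> simp_all <;> omega
  case pos =>
  subst hb
  by_cases hc : c = 0
  case neg =>
    have hA := loop2_char 2 c 2 (d :: e :: rest) (by omega) (by simp) (by omega) hpw2
    have hl1 : pvA_loop1 (0 :: 0 :: c :: d :: e :: rest) 0 0 = (2, 2) := by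
      simp [pvA_loop1, hc]
    have hl2 : pvB_lead [0, 0, c, d, e] 0 = 2 := by simp [pvB_lead, hc]
    rw [hl1, hl2]
    norm_num
    rw [hA]
    simp [chainLt, PySem.Set.ofList, PySem.Set.add, List.take, PySem.List.pyGet?_neg_one,
      PySem.List.slice_from]
    split_ifs <;> simp_all <;> omega
  case pos =>
  subst hc
  by_cases hd : d = 0
  case neg =>
    have hA := loop2_char 1 d 3 (e :: rest) (by omega) (by simp) (by omega) hpw3
    have hl1 : pvA_loop1 (0 :: 0 :: 0 :: d :: e :: rest) 0 0 = (3, 3) := by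
      simp [pvA_loop1, hd]
    have hl2 : pvB_lead [0, 0, 0, d, e] 0 = 3 := by simp [pvB_lead, hd]
    rw [hl1, hl2]
    norm_num
    rw [hA]
    simp [chainLt, PySem.Set.ofList, PySem.Set.add, List.take, PySem.List.pyGet?_neg_one,
      PySem.List.slice_from]
    split_ifs <;> simp_all <;> omega
  case pos =>
  subst hd
  by_cases he : e = 0
  case neg =>
    have hA := loop2_char 0 e 4 rest (by omega) (by simp) (by omega) hpw4
    have hl1 : pvA_loop1 (0 :: 0 :: 0 :: 0 :: e :: rest) 0 0 = (4, 4) := by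
      simp [pvA_loop1, he]
    have hl2 : pvB_lead [0, 0, 0, 0, e] 0 = 4 := by simp [pvB_lead, he]
    rw [hl1, hl2]
    norm_num
    rw [hA]
    simp [chainLt, PySem.Set.ofList, PySem.Set.add, List.take, PySem.List.pyGet?_neg_one,
      PySem.List.slice_from]
  case pos =>
  subst he
  have hl1 : pvA_loop1 (0 :: 0 :: 0 :: 0 :: 0 :: rest) 0 0 = (5, 5) := by
    simp [pvA_loop1, pvA_loop1_stop]
  have hl2 : pvB_lead [0, 0, 0, 0, 0] 0 = 5 := by simp [pvB_lead]
  rw [hl1, hl2]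
  simp [PySem.List.slice_from]


lemma pv_core0 : pvA_body [] = pvB_body [] := by decide

lemma pv_core1 (w : Int) : pvA_body [w] = pvB_body [w] := by
  have hfive : PySem.List.slice [w] none (some 5) = [w] := by
    rw [PySem.List.slice_to _ (by norm_num)]; rfl
  rw [Bool.eq_iff_iff]
  simp only [pvA_body, pvB_body, hfive]
  by_cases hw : w = 0 <;>
    simp [pvA_loop1, pvA_loop2, pvB_lead, PySem.Set.ofList, PySem.Set.add,
      PySem.List.pyGet?_neg_one, PySem.List.slice_from, hw]

lemma pv_core2 (w x : Int) (hpw : ([w, x] : List Int).Pairwise (fun p q => p ≤ q)) :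
    pvA_body [w, x] = pvB_body [w, x] := by
  have h1 : w ≤ x := (List.pairwise_cons.mp hpw).1 x (by simp)
  have hfive : PySem.List.slice [w, x] none (some 5) = [w, x] := by
    rw [PySem.List.slice_to _ (by norm_num)]; rfl
  rw [Bool.eq_iff_iff]
  simp only [pvA_body, pvB_body, hfive]
  by_cases hw : w = 0 <;> by_cases hx : x = 0 <;>
    simp [pvA_loop1, pvA_loop2, pvB_lead, PySem.Set.ofList, PySem.Set.add,
      PySem.List.pyGet?_neg_one, PySem.List.slice_from, hw, hx] <;>
    split_ifs <;> simp_all <;> omega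

lemma pv_core3 (w x y : Int) (hpw : ([w, x, y] : List Int).Pairwise (fun p q => p ≤ q)) :
    pvA_body [w, x, y] = pvB_body [w, x, y] := by
  have h1 : w ≤ x := (List.pairwise_cons.mp hpw).1 x (by simp)
  have h2 : x ≤ y := (List.pairwise_cons.mp (List.pairwise_cons.mp hpw).2).1 y (by simp)
  have hfive : PySem.List.slice [w, x, y] none (some 5) = [w, x, y] := by
    rw [PySem.List.slice_to _ (by norm_num)]; rfl
  rw [Bool.eq_iff_iff]
  simp only [pvA_body, pvB_body, hfive]
  by_cases hw : w = 0 <;> by_cases hx : x = 0 <;> by_cases hy : y = 0 <;>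
    simp [pvA_loop1, pvA_loop2, pvB_lead, PySem.Set.ofList, PySem.Set.add,
      PySem.List.pyGet?_neg_one, PySem.List.slice_from, hw, hx, hy] <;>
    split_ifs <;> simp_all <;> omega

set_option maxHeartbeats 1000000 in
lemma pv_core4 (w x y z : Int) (hpw : ([w, x, y, z] : List Int).Pairwise (fun p q => p ≤ q)) :
    pvA_body [w, x, y, z] = pvB_body [w, x, y, z] := by
  have h1 : w ≤ x := (List.pairwise_cons.mp hpw).1 x (by simp)
  have h2 : x ≤ y := (List.pairwise_cons.mp (List.pairwise_cons.mp hpw).2).1 y (by simp)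
  have h3 : y ≤ z :=
    (List.pairwise_cons.mp (List.pairwise_cons.mp (List.pairwise_cons.mp hpw).2).2).1 z (by simp)
  have hfive : PySem.List.slice [w, x, y, z] none (some 5) = [w, x, y, z] := by
    rw [PySem.List.slice_to _ (by norm_num)]; rfl
  rw [Bool.eq_iff_iff]
  simp only [pvA_body, pvB_body, hfive]
  by_cases hw : w = 0 <;> by_cases hx : x = 0 <;> by_cases hy : y = 0 <;> by_cases hz : z = 0 <;>
    simp [pvA_loop1, pvA_loop2, pvB_lead, PySem.Set.ofList, PySem.Set.add,
      PySem.List.pyGet?_neg_one, PySem.List.slice_from, hw, hx, hy, hz] <;>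
    split_ifs <;> simp_all <;> omega

theorem isStraight_v2_spec : Claim_equal_isStraight_v2 := by
  intro nums _ _
  unfold Spec_isStraight_v2
  unfold isStraight_v2 isStraight_v2_alt
  have hpw : (PySem.List.sorted nums (fun v => v) false).Pairwise (fun p q => p ≤ q) :=
    PySem.List.sorted_pairwise nums (fun v => v)
  match PySem.List.sorted nums (fun v => v) false, hpw with
  | [], _ => exact pv_core0
  | [w], _ => exact pv_core1 w
  | [w, x], hpw => exact pv_core2 w x hpw
  | [w, x, y], hpw => exact pv_core3 w x y hpw
  | [w, x, y, z], hpw => exact pv_core4 w x y z hpw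
  | a :: b :: c :: d :: e :: rest, hpw => exact pv_core a b c d e rest hpw
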